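-- pv_equiv track=rewrite | github.com/elliotnunn/lpch | patch_rip.py | exact_log
-- ===== SOURCE A (Python) =====
-- def exact_log(n):
--     if not n: return None
--     sh = 0
--     while n & 1 == 0:
--         sh += 2
--         n >>= 1
--     if n != 1: return None
--     return sh
-- ===== SOURCE B (Python) =====
-- def exact_log(n):
--     if n > 0 and n == 1 << (n.bit_length() - 1):
--         return 2 * (n.bit_length() - 1)
--     return None
-- ===== Notes on version B (the rewrite author's own statement) =====
-- stated objective: idiomatic
-- what changed: Replaces the trailing-zero shift loop with a closed-form power-of-two test via bit_length, computing twice (bit_length minus one) directly with no loop.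
import Mathlib
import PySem

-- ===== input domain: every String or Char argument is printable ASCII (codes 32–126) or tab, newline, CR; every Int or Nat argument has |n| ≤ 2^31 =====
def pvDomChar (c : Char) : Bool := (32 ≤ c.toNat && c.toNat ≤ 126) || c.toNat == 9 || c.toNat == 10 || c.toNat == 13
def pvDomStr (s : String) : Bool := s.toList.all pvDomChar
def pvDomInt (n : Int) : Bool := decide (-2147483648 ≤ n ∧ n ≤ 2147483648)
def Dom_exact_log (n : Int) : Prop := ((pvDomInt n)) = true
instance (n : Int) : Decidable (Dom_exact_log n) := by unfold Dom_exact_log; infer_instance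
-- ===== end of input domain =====

-- B replaces A's shift loop by a closed-form bit_length power-of-two test (idiomatic, no loop).


-- ===== PORT A =====
-- the while loop; the `n ≠ 0` conjunct only makes the recursion total (the caller
-- guarantees n ≠ 0, and on inputs with n ≠ 0 the guard is Python's `n & 1 == 0`)
def exactLogLoop (sh : Int) (n : Int) : Option Int :=
  if h : n ≠ 0 ∧ PySem.Int.mod n 2 = 0 then
    exactLogLoop (sh + 2) (PySem.Int.floordiv n 2)
  else if n ≠ 1 then none else some sh
termination_by n.natAbs
decreasing_by
  rw [PySem.Int.floordiv_eq_ediv_of_pos (by norm_num)]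
  have hm := PySem.Int.mod_eq_emod_of_pos (a := n) (b := 2) (by norm_num)
  rw [hm] at h
  omega

def exact_log (n : Int) : Option Int :=
  if n = 0 then none else exactLogLoop 0 n

-- ===== PORT B =====
def exact_log_alt (n : Int) : Option Int :=
  if 0 < n ∧ n = 2 ^ (PySem.Int.bitLength n - 1) then
    some (2 * ((PySem.Int.bitLength n : Int) - 1))
  else none

-- ===== PRECONDITION & SPEC =====
def Spec_exact_log (n : Int) (out : Option Int) : Prop := out = exact_log_alt n
instance (n : Int) (out : Option Int) : Decidable (Spec_exact_log n out) := by unfold Spec_exact_log; infer_instance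

-- ===== CLAIM (what is proved, stated in full; the proofs are below) =====
def Claim_equal_exact_log : Prop := ∀ (n : Int), Dom_exact_log n → Spec_exact_log n (exact_log n)

-- ===== LEMMAS AND PROOFS =====

theorem pv_mod_two (n : Int) : PySem.Int.mod n 2 = n % 2 :=
  PySem.Int.mod_eq_emod_of_pos (by norm_num)

theorem pv_div_two (n : Int) : PySem.Int.floordiv n 2 = n / 2 :=
  PySem.Int.floordiv_eq_ediv_of_pos (by norm_num)

theorem loop_pow (k : Nat) : ∀ sh : Int, exactLogLoop sh (2 ^ k) = some (sh + 2 * k) := by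
  induction k with
  | zero =>
    intro sh
    rw [exactLogLoop]
    norm_num
  | succ k ih =>
    intro sh
    rw [exactLogLoop]
    have h2 : ((2 : Int) ^ (k + 1)) ≠ 0 := by positivity
    have hmod : PySem.Int.mod ((2 : Int) ^ (k + 1)) 2 = 0 := by
      rw [pv_mod_two, pow_succ, Int.mul_emod_left]
    have hdiv : PySem.Int.floordiv ((2 : Int) ^ (k + 1)) 2 = 2 ^ k := by
      rw [pv_div_two, pow_succ, Int.mul_ediv_cancel _ (by norm_num)]
    rw [dif_pos ⟨h2, hmod⟩, hdiv, ih]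
    congr 1
    push_cast
    ring

theorem loop_not_pow (m : Nat) : ∀ (n sh : Int), n.natAbs ≤ m → n ≠ 0 →
    (∀ k : Nat, n ≠ 2 ^ k) → exactLogLoop sh n = none := by
  induction m with
  | zero => intro n sh hle hne _; omega
  | succ m ih =>
    intro n sh hle hne hnp
    rw [exactLogLoop]
    by_cases hev : PySem.Int.mod n 2 = 0
    · rw [dif_pos ⟨hne, hev⟩]
      rw [pv_mod_two] at hev
      have hd2 : n = 2 * (n / 2) := by omega
      apply ih
      · rw [pv_div_two]; omega
      · rw [pv_div_two]; omega
      · intro k hk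
        rw [pv_div_two] at hk
        exact hnp (k + 1) (by rw [pow_succ, mul_comm, ← hk]; omega)
    · rw [dif_neg (by tauto)]
      have h1 : n ≠ 1 := by
        intro h; exact hnp 0 (by simp [h])
      rw [if_pos h1]

theorem bitLength_two_pow (k : Nat) : PySem.Int.bitLength ((2 : Int) ^ k) = k + 1 := by
  induction k with
  | zero => decide
  | succ k ih =>
    have h : ((2 : Int) ^ (k + 1)) = ((2 ^ (k + 1) : Nat) : Int) := by push_cast; ring
    rw [h, PySem.Int.bitLength_natCast (by positivity)]
    have h2 : (2 ^ (k + 1) : Nat) / 2 = 2 ^ k := by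
      rw [pow_succ, Nat.mul_div_cancel _ (by norm_num)]
    rw [h2]
    have h3 : ((2 ^ k : Nat) : Int) = (2 : Int) ^ k := by push_cast; ring
    rw [h3, ih]

-- ===== VERDICT (by name: the statement is the Claim_ definition above) =====
theorem exact_log_spec : Claim_equal_exact_log := by
  intro n _
  unfold Spec_exact_log exact_log exact_log_alt
  by_cases hp : ∃ k : Nat, n = 2 ^ k
  · obtain ⟨k, rfl⟩ := hp
    have hpos : (0 : Int) < 2 ^ k := by positivity
    rw [if_neg (by positivity), loop_pow, bitLength_two_pow]
    have : k + 1 - 1 = k := rfl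
    rw [if_pos ⟨hpos, by rw [this]⟩]
    congr 1
    push_cast
    ring
  · push Not at hp
    by_cases h0 : n = 0
    · subst h0
      rw [if_pos rfl, if_neg (by simp)]
    · rw [if_neg h0, loop_not_pow n.natAbs n 0 le_rfl h0 hp,
        if_neg (fun ⟨_, he⟩ => hp _ he)]
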